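-- pv_equiv track=rewrite | github.com/pypi-data/pypi-mirror-402 | packages/jupyter-cli/jupyter_cli-0.1.2.tar.gz/jupyter_cli-0.1.2/jupyter_cli/cli.py | get_first_line
-- ===== SOURCE A (Python) =====
-- def get_first_line(source: str, max_len: int = 60) -> str:
--     """Get first non-empty line of source, truncated."""
--     for line in source.split("\n"):
--         line = line.strip()
--         if line and not line.startswith("#"):
--             if len(line) > max_len:
--                 return line[:max_len] + "..."
--             return line
--     # If all lines are comments or empty, return first non-empty
--     for line in source.split("\n"):
--         line = line.strip()
--         if line:
--             if len(line) > max_len: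
--                 return line[:max_len] + "..."
--             return line
--     return ""
-- ===== SOURCE B (Python) =====
-- def _trunc(line, max_len):
--     return line[:max_len] + "..." if len(line) > max_len else line
--
-- def get_first_line(source: str, max_len: int = 60) -> str:
--     fallback = None
--     for raw in source.split("\n"):
--         line = raw.strip()
--         if line:
--             if fallback is None:
--                 fallback = line
--             if not line.startswith("#"):
--                 return _trunc(line, max_len)
--     return _trunc(fallback, max_len) if fallback is not None else ""
-- ===== Notes on version B (the rewrite author's own statement) =====
-- stated objective: simpler
-- what changed: Replaces A's two full passes over the split lines by one pass that remembers the first non-empty line as a fallback, with the truncation factored into a helper instead of duplicated.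
import Mathlib
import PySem

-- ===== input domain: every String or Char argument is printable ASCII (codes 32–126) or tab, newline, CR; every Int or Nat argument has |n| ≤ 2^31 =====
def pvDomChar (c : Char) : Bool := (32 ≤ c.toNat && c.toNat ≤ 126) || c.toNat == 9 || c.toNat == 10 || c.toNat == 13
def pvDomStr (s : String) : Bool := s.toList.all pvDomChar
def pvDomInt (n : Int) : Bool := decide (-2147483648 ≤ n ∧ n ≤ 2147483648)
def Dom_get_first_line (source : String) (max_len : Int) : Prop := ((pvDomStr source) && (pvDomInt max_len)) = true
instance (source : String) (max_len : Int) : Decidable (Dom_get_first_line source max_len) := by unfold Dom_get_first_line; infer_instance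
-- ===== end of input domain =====

-- B changes: one pass with a fallback instead of A's two passes; truncation factored into a helper (objective: simpler).

-- ===== PORT A =====
-- first loop of A: first stripped line that is non-empty and not a comment, truncated
def pvLoopA1 (ls : List (List Char)) (max_len : Int) : Option (List Char) :=
  match ls with
  | [] => none
  | raw :: rest =>
    let line := PySem.Chars.strip raw
    if !line.isEmpty && !PySem.Chars.startswith line ['#'] then
      some (if PySem.Chars.len line > max_len
            then PySem.Chars.slice line none (some max_len) ++ ['.', '.', '.']
            else line)
    else pvLoopA1 rest max_len

-- second loop of A: first stripped non-empty line, truncated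
def pvLoopA2 (ls : List (List Char)) (max_len : Int) : Option (List Char) :=
  match ls with
  | [] => none
  | raw :: rest =>
    let line := PySem.Chars.strip raw
    if !line.isEmpty then
      some (if PySem.Chars.len line > max_len
            then PySem.Chars.slice line none (some max_len) ++ ['.', '.', '.']
            else line)
    else pvLoopA2 rest max_len

def get_first_line (source : String) (max_len : Int) : String :=
  let lines := PySem.Chars.splitOn source.toList ['\n']
  match pvLoopA1 lines max_len with
  | some r => String.ofList r
  | none =>
    match pvLoopA2 lines max_len with
    | some r => String.ofList r
    | none => ""

-- ===== PORT B =====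
def pvTrunc (line : List Char) (max_len : Int) : List Char :=
  if PySem.Chars.len line > max_len
  then PySem.Chars.slice line none (some max_len) ++ ['.', '.', '.']
  else line

def pvLoopB (ls : List (List Char)) (fallback : Option (List Char)) (max_len : Int) : String :=
  match ls with
  | [] =>
    match fallback with
    | some f => String.ofList (pvTrunc f max_len)
    | none => ""
  | raw :: rest =>
    let line := PySem.Chars.strip raw
    if line.isEmpty then pvLoopB rest fallback max_len
    else
      let fallback' := if fallback.isNone then some line else fallback
      if PySem.Chars.startswith line ['#'] then pvLoopB rest fallback' max_len
      else String.ofList (pvTrunc line max_len)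

def get_first_line_alt (source : String) (max_len : Int) : String :=
  pvLoopB (PySem.Chars.splitOn source.toList ['\n']) none max_len

-- ===== PRECONDITION & SPEC =====
def Spec_get_first_line (source : String) (max_len : Int) (out : String) : Prop := out = get_first_line_alt source max_len
instance (source : String) (max_len : Int) (out : String) : Decidable (Spec_get_first_line source max_len out) := by unfold Spec_get_first_line; infer_instance

-- ===== CLAIM (what is proved, stated in full; the proofs are below) =====
def Claim_equal_get_first_line : Prop := ∀ (source : String) (max_len : Int), Dom_get_first_line source max_len → Spec_get_first_line source max_len (get_first_line source max_len)

-- ===== LEMMAS AND PROOFS =====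
-- once the fallback is set, B's remaining loop is exactly A's first loop with the fallback result as default
theorem pvLoopB_some (ls : List (List Char)) (f : List Char) (m : Int) :
    pvLoopB ls (some f) m =
      match pvLoopA1 ls m with
      | some r => String.ofList r
      | none => String.ofList (pvTrunc f m) := by
  induction ls with
  | nil => simp [pvLoopB, pvLoopA1]
  | cons raw rest ih =>
    simp only [pvLoopB, pvLoopA1]
    by_cases he : (PySem.Chars.strip raw).isEmpty
    · simp [he, ih]
    · by_cases hc : PySem.Chars.startswith (PySem.Chars.strip raw) ['#']
      · simp [he, hc, ih]
      · simp [he, hc, pvTrunc]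

theorem pvLoopB_none (ls : List (List Char)) (m : Int) :
    pvLoopB ls none m =
      match pvLoopA1 ls m with
      | some r => String.ofList r
      | none =>
        match pvLoopA2 ls m with
        | some r => String.ofList r
        | none => "" := by
  induction ls with
  | nil => simp [pvLoopB, pvLoopA1, pvLoopA2]
  | cons raw rest ih =>
    simp only [pvLoopB, pvLoopA1, pvLoopA2]
    by_cases he : (PySem.Chars.strip raw).isEmpty
    · simp [he, ih]
    · by_cases hc : PySem.Chars.startswith (PySem.Chars.strip raw) ['#']
      · simp [he, hc, pvLoopB_some, pvTrunc]
      · simp [he, hc, pvTrunc]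

-- ===== VERDICT (by name: the statement is the Claim_ definition above) =====
theorem get_first_line_spec : Claim_equal_get_first_line := by
  intro source max_len _
  unfold Spec_get_first_line get_first_line get_first_line_alt
  rw [pvLoopB_none]
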